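-- pv_equiv track=rewrite | github.com/indincys/poster-studio-macos | scripts/generate_title_library.py | fallback_titles
-- ===== SOURCE A (Python) =====
-- def fallback_titles(prompt: str, count: int) -> list[str]:
--     topic = prompt.strip() or "商品"
--     templates = [
--         f"{topic}真的越用越顺手",
--         f"这条别滑走，{topic}我想认真推荐",
--         f"{topic}别乱选，这种更省心",
--         f"{topic}用下来最想夸的是这点",
--         f"最近反复回购的{topic}",
--         f"{topic}实测后，我更愿意留这款",
--         f"{topic}做得对不对，看这几个细节",
--         f"如果只留一款{topic}，我会选它",
--         f"{topic}不一定最贵，但真的更好用",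
--         f"{topic}为什么容易出单，这条说清楚",
--         f"{topic}闭眼入之前，先看这一条",
--         f"{topic}适不适合你，看完就知道",
--         f"{topic}一上手就知道差别在哪",
--         f"{topic}值不值得买，重点看这里",
--         f"{topic}这版细节，真的更适合日常用",
--     ]
--
--     titles: list[str] = []
--     for index in range(count):
--         titles.append(templates[index % len(templates)])
--     return titles
-- ===== SOURCE B (Python) =====
-- def fallback_titles(prompt: str, count: int) -> list[str]:
--     topic = prompt.strip() or "商品"
--     templates = [
--         f"{topic}真的越用越顺手",
--         f"这条别滑走，{topic}我想认真推荐",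
--         f"{topic}别乱选，这种更省心",
--         f"{topic}用下来最想夸的是这点",
--         f"最近反复回购的{topic}",
--         f"{topic}实测后，我更愿意留这款",
--         f"{topic}做得对不对，看这几个细节",
--         f"如果只留一款{topic}，我会选它",
--         f"{topic}不一定最贵，但真的更好用",
--         f"{topic}为什么容易出单，这条说清楚",
--         f"{topic}闭眼入之前，先看这一条",
--         f"{topic}适不适合你，看完就知道",
--         f"{topic}一上手就知道差别在哪",
--         f"{topic}值不值得买，重点看这里",
--         f"{topic}这版细节，真的更适合日常用",
--     ]
--     reps, rem = divmod(max(count, 0), len(templates))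
--     return templates * reps + templates[:rem]
-- ===== Notes on version B (the rewrite author's own statement) =====
-- stated objective: simpler
-- what changed: B replaces A's element-by-element loop with modulo indexing by a closed-form construction: divmod of the clamped count by the template count, then full-list repetition plus a remainder slice.
import Mathlib
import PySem

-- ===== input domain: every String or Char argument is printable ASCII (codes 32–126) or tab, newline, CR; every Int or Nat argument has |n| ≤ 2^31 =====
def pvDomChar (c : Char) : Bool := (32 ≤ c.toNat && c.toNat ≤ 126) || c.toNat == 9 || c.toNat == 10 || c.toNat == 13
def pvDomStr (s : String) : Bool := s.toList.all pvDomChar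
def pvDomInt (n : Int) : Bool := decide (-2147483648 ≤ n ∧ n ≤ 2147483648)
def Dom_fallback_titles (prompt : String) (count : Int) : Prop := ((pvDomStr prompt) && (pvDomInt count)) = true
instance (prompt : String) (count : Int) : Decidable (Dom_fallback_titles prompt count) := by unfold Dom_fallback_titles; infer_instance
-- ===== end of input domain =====

-- B builds the result as full-list repetition plus a remainder slice (divmod) instead of A's
-- per-index loop with modulo indexing; objective: simpler (closed-form construction, no loop).

-- ===== PORT A =====
-- shared setup, identical lines in both Pythons: topic = prompt.strip() or "商品" and the 15 templates
def pvTemplates (prompt : String) : List String :=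
  let t := PySem.Str.strip prompt
  let topic := if t = "" then "商品" else t
  [ topic ++ "真的越用越顺手",
    "这条别滑走，" ++ topic ++ "我想认真推荐",
    topic ++ "别乱选，这种更省心",
    topic ++ "用下来最想夸的是这点",
    "最近反复回购的" ++ topic,
    topic ++ "实测后，我更愿意留这款",
    topic ++ "做得对不对，看这几个细节",
    "如果只留一款" ++ topic ++ "，我会选它",
    topic ++ "不一定最贵，但真的更好用",
    topic ++ "为什么容易出单，这条说清楚",
    topic ++ "闭眼入之前，先看这一条",
    topic ++ "适不适合你，看完就知道",
    topic ++ "一上手就知道差别在哪",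
    topic ++ "值不值得买，重点看这里",
    topic ++ "这版细节，真的更适合日常用" ]

def fallback_titles (prompt : String) (count : Int) : List String :=
  let templates := pvTemplates prompt
  (PySem.List.pyRange 0 count 1).foldl
    (fun titles index =>
      titles ++ [PySem.List.pyGetD templates (PySem.Int.mod index (templates.length : Int)) ""])
    []

-- ===== PORT B =====
def fallback_titles_alt (prompt : String) (count : Int) : List String :=
  let templates := pvTemplates prompt
  -- divmod(max(count, 0), len(templates)); the divisor 15 is never zero, so divmod = (floordiv, mod)
  let reps := PySem.Int.floordiv (max count 0) (templates.length : Int)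
  let rem := PySem.Int.mod (max count 0) (templates.length : Int)
  PySem.List.pyRepeat templates reps ++ PySem.List.slice templates none (some rem)

-- ===== PRECONDITION & SPEC =====
def Spec_fallback_titles (prompt : String) (count : Int) (out : List String) : Prop := out = fallback_titles_alt prompt count
instance (prompt : String) (count : Int) (out : List String) : Decidable (Spec_fallback_titles prompt count out) := by unfold Spec_fallback_titles; infer_instance

-- ===== CLAIM (what is proved, stated in full; the proofs are below) =====
def Claim_equal_fallback_titles : Prop := ∀ (prompt : String) (count : Int), Dom_fallback_titles prompt count → Spec_fallback_titles prompt count (fallback_titles prompt count)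

-- ===== LEMMAS AND PROOFS =====

theorem pvTemplates_length (prompt : String) : (pvTemplates prompt).length = 15 := by
  simp [pvTemplates]

theorem pvRepeat_succ {α : Type} (L : List α) (k : Nat) :
    PySem.List.pyRepeat L ((k : Int) + 1) = PySem.List.pyRepeat L (k : Int) ++ L := by
  simp [PySem.List.pyRepeat, List.replicate_succ']

theorem pvLoop_eq (L : List String) (hL : L.length = 15) (n : Nat) :
    (PySem.List.pyRange 0 (n : Int) 1).foldl
      (fun titles index =>
        titles ++ [PySem.List.pyGetD L (PySem.Int.mod index (L.length : Int)) ""]) []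
    = PySem.List.pyRepeat L ((n / 15 : Nat) : Int) ++ L.take (n % 15) := by
  induction n with
  | zero =>
      simp [PySem.List.pyRange_one_eq_nil, PySem.List.pyRepeat]
  | succ n ih =>
      have hsplit : PySem.List.pyRange 0 ((n : Int) + 1) 1
          = PySem.List.pyRange 0 (n : Int) 1 ++ [(n : Int)] :=
        PySem.List.pyRange_one_succ_right (by exact_mod_cast Int.natCast_nonneg n)
      have hcast : ((n + 1 : Nat) : Int) = (n : Int) + 1 := by push_cast; ring
      rw [hcast, hsplit, List.foldl_append, ih]
      have hmod : PySem.Int.mod (n : Int) (L.length : Int) = ((n % 15 : Nat) : Int) := by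
        rw [hL]; exact_mod_cast PySem.Int.mod_natCast n 15
      have hlt : n % 15 < L.length := by omega
      have hget : PySem.List.pyGetD L ((n % 15 : Nat) : Int) "" = L[n % 15] := by
        rw [PySem.List.pyGetD_natCast]
        exact List.getD_eq_getElem L "" hlt
      simp only [List.foldl_cons, List.foldl_nil, hmod, hget, List.append_assoc]
      by_cases hwrap : n % 15 = 14
      · have h1 : (n + 1) / 15 = n / 15 + 1 := by omega
        have h2 : (n + 1) % 15 = 0 := by omega
        have h3 : L.take (n % 15) ++ [L[n % 15]] = L := by
          have ht : L.take (n % 15 + 1) = L.take (n % 15) ++ [L[n % 15]] := by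
            rw [List.take_add_one, List.getElem?_eq_getElem hlt]
            rfl
          rw [← ht, show n % 15 + 1 = 15 by omega, ← hL, List.take_length]
        rw [h1, h2, h3,
          show ((n / 15 + 1 : Nat) : Int) = ((n / 15 : Nat) : Int) + 1 by push_cast; ring,
          pvRepeat_succ]
        simp
      · have h1 : (n + 1) / 15 = n / 15 := by omega
        have h2 : (n + 1) % 15 = n % 15 + 1 := by omega
        rw [h1, h2, List.take_add_one, List.getElem?_eq_getElem hlt]
        rfl

-- ===== VERDICT (by name: the statement is the Claim_ definition above) =====
theorem fallback_titles_spec : Claim_equal_fallback_titles := by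
  intro prompt count _
  unfold Spec_fallback_titles fallback_titles fallback_titles_alt
  dsimp only
  set L := pvTemplates prompt with hLdef
  have hL : L.length = 15 := pvTemplates_length prompt
  by_cases hc : count ≤ 0
  · have hmax : max count 0 = 0 := by omega
    have hfd0 : PySem.Int.floordiv 0 (L.length : Int) = 0 := by rw [hL]; decide
    have hmd0 : PySem.Int.mod 0 (L.length : Int) = 0 := by rw [hL]; decide
    rw [PySem.List.pyRange_one_eq_nil hc, hmax, hfd0, hmd0]
    simp [PySem.List.pyRepeat, PySem.List.slice, PySem.List.clampIdx]
  · have hpos : 0 ≤ count := by omega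
    have hmax : max count 0 = count := by omega
    obtain ⟨m, hm⟩ : ∃ m : Nat, count = (m : Int) := ⟨count.toNat, (Int.toNat_of_nonneg hpos).symm⟩
    subst hm
    rw [hmax, pvLoop_eq L hL m]
    have hfd : PySem.Int.floordiv (m : Int) (L.length : Int) = ((m / 15 : Nat) : Int) := by
      rw [hL]; exact_mod_cast PySem.Int.floordiv_natCast m 15
    have hmd : PySem.Int.mod (m : Int) (L.length : Int) = ((m % 15 : Nat) : Int) := by
      rw [hL]; exact_mod_cast PySem.Int.mod_natCast m 15
    rw [hfd, hmd, PySem.List.slice_to_natCast]
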